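-- pv_equiv track=rewrite | github.com/sea-monsters/plot-extractor | plot_extractor/core/skeleton_path.py | extract_path_data
-- ===== SOURCE A (Python) =====
-- from typing import List, Tuple
--
-- def extract_path_data(
--     paths: List[List[Tuple[int, int]]],
-- ) -> Tuple[List[int], List[int]]:
--     """Convert traced paths to flat x, y coordinate lists.
--
--     Args:
--         paths: Output of trace_skeleton_paths().
--
--     Returns:
--         (xs, ys) coordinate lists suitable for axis calibration.
--     """
--     if not paths:
--         return [], []
--
--     xs = []
--     ys = []
--     for path in paths:
--         for x, y in path:
--             xs.append(x)
--             ys.append(y)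
--
--     return xs, ys
-- ===== SOURCE B (Python) =====
-- def extract_path_data(paths):
--     flat = [pt for path in paths for pt in path]
--     if not flat:
--         return [], []
--     xs, ys = zip(*flat)
--     return list(xs), list(ys)
-- ===== Notes on version B (the rewrite author's own statement) =====
-- stated objective: simpler
-- what changed: Replaces the two lockstep accumulator lists built in nested loops by flatten-then-transpose (one comprehension plus zip(*flat)).
import Mathlib
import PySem

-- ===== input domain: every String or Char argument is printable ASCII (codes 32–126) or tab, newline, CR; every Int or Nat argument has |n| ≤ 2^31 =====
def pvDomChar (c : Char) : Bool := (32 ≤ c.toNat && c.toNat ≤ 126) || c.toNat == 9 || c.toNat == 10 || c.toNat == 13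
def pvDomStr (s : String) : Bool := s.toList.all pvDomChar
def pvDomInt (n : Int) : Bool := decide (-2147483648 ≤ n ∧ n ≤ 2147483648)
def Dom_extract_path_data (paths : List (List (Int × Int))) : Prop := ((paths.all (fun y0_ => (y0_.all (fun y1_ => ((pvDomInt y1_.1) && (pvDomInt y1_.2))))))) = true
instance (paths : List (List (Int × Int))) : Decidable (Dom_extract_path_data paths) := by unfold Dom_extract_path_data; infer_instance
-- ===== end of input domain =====

-- ===== PORT A =====
def extract_path_data (paths : List (List (Int × Int))) : List Int × List Int :=
  if paths = [] then ([], [])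
  else
    -- nested loops appending x to xs and y to ys, as a fold over the same state
    paths.foldl (fun acc path =>
      path.foldl (fun (acc : List Int × List Int) xy =>
        (acc.1 ++ [xy.1], acc.2 ++ [xy.2])) acc) ([], [])

-- ===== PORT B =====
def extract_path_data_alt (paths : List (List (Int × Int))) : List Int × List Int :=
  let flat := paths.flatten
  if flat = [] then ([], [])
  else (flat.map Prod.fst, flat.map Prod.snd)

-- ===== PRECONDITION & SPEC =====
def Spec_extract_path_data (paths : List (List (Int × Int))) (out : List Int × List Int) : Prop := out = extract_path_data_alt paths
instance (paths : List (List (Int × Int))) (out : List Int × List Int) : Decidable (Spec_extract_path_data paths out) := by unfold Spec_extract_path_data; infer_instance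

-- ===== CLAIM (what is proved, stated in full; the proofs are below) =====
def Claim_equal_extract_path_data : Prop := ∀ (paths : List (List (Int × Int))), Dom_extract_path_data paths → Spec_extract_path_data paths (extract_path_data paths)

-- ===== LEMMAS AND PROOFS =====

-- ===== VERDICT (by name: the statement is the Claim_ definition above) =====
theorem pv_inner (path : List (Int × Int)) (acc : List Int × List Int) :
    path.foldl (fun (acc : List Int × List Int) xy =>
        (acc.1 ++ [xy.1], acc.2 ++ [xy.2])) acc
      = (acc.1 ++ path.map Prod.fst, acc.2 ++ path.map Prod.snd) := by
  induction path generalizing acc with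
  | nil => simp
  | cons h t ih => simp [List.foldl, ih]

theorem pv_outer (paths : List (List (Int × Int))) (acc : List Int × List Int) :
    paths.foldl (fun acc path =>
      path.foldl (fun (acc : List Int × List Int) xy =>
        (acc.1 ++ [xy.1], acc.2 ++ [xy.2])) acc) acc
      = (acc.1 ++ paths.flatten.map Prod.fst, acc.2 ++ paths.flatten.map Prod.snd) := by
  induction paths generalizing acc with
  | nil => simp
  | cons h t ih =>
    rw [List.foldl_cons, pv_inner, ih]
    simp [List.append_assoc]

theorem extract_path_data_spec : Claim_equal_extract_path_data := by
  intro paths _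
  unfold Spec_extract_path_data extract_path_data extract_path_data_alt
  by_cases h1 : paths = []
  · subst h1; simp
  · simp only [if_neg h1, pv_outer, List.nil_append]
    by_cases h2 : paths.flatten = [] <;> simp [h2]
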